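-- pv_equiv track=rewrite | github.com/fengbaoheng/leetcode | Algorithms/401.binary-watch.py | count_light
-- ===== SOURCE A (Python) =====
-- def count_light(max_range:int):
--     d = {}
--     for i in range(max_range):
--         count = list(bin(i)[2:]).count('1')
--         if count in d:
--             d[count].append(i)
--         else:
--             d[count] = [i]
--     return d
-- ===== SOURCE B (Python) =====
-- def count_light(max_range: int):
--     # O(n) incremental-popcount DP instead of formatting each i as a binary string.
--     d = {}
--     pc = []
--     for i in range(max_range):
--         pc.append(pc[i >> 1] + (i & 1) if i else 0)
--         d.setdefault(pc[i], []).append(i)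
--     return d
-- ===== Notes on version B (the rewrite author's own statement) =====
-- stated objective: faster
-- what changed: Replaces the per-element binary-string formatting and character count with an incremental popcount DP table pc[i] = pc[i>>1] + (i&1), building the dict in one pass with setdefault.
import Mathlib
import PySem

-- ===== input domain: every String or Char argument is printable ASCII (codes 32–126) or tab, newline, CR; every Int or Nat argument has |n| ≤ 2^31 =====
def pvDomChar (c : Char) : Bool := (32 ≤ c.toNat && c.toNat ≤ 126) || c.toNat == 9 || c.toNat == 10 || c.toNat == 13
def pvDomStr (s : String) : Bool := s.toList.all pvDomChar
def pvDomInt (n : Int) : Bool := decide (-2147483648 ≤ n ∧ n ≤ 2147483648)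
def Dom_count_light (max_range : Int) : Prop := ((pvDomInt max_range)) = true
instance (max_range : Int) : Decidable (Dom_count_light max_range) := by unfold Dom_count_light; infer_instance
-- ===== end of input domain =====

-- B replaces A's per-element binary-string formatting with an incremental popcount
-- DP (pc[i] = pc[i>>1] + (i&1)), building the dict in one pass (objective: faster).

-- ===== PORT A =====
-- one loop body step: count = list(bin(i)[2:]).count('1'); if count in d: append else new list
def countLightStepA (d : PySem.Dict Int (List Int)) (i : Int) : PySem.Dict Int (List Int) :=
  let count : Int := ((PySem.Int.toBinChars i).count '1' : Nat)  -- bin(i)[2:] for i ≥ 0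
  match d.get? count with
  | some l => d.insert count (l ++ [i])   -- d[count].append(i): overwrite keeps position
  | none   => d.insert count [i]

def count_light (max_range : Int) : List (Int × List Int) :=
  ((PySem.List.pyRange 0 max_range 1).foldl countLightStepA PySem.Dict.empty).items

-- ===== PORT B =====
-- one loop body step of Source B: pc.append(pc[i >> 1] + (i & 1) if i else 0);
-- d.setdefault(pc[i], []).append(i)  — ported as Dict.modify (= setdefault + in-place append).
def countLightStepB (s : PySem.Dict Int (List Int) × List Int) (i : Int) :
    PySem.Dict Int (List Int) × List Int :=
  let pc := s.2 ++ [if i ≠ 0 then PySem.List.pyGetD s.2 (i >>> (1 : Nat)) 0 + PySem.Int.band i 1 else 0]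
  let c := PySem.List.pyGetD pc i 0
  (s.1.modify c [] (fun l => l ++ [i]), pc)

def count_light_alt (max_range : Int) : List (Int × List Int) :=
  ((PySem.List.pyRange 0 max_range 1).foldl countLightStepB (PySem.Dict.empty, [])).1.items

-- ===== PRECONDITION & SPEC =====
def Spec_count_light (max_range : Int) (out : List (Int × List Int)) : Prop := out = count_light_alt max_range
instance (max_range : Int) (out : List (Int × List Int)) : Decidable (Spec_count_light max_range out) := by unfold Spec_count_light; infer_instance

-- ===== CLAIM (what is proved, stated in full; the proofs are below) =====
def Claim_equal_count_light : Prop := ∀ (max_range : Int), Dom_count_light max_range → Spec_count_light max_range (count_light max_range)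

-- ===== LEMMAS AND PROOFS =====

-- the key A computes for i = n : number of '1' characters in bin(n)
def popc (n : Nat) : Int := ((PySem.Int.toBinChars (n : Int)).count '1' : Nat)

lemma toBinChars_natCast (n : Nat) :
    PySem.Int.toBinChars (n : Int) = Nat.toDigits 2 n := by
  simp [PySem.Int.toBinChars]

lemma popc_zero : popc 0 = 0 := by decide

lemma popc_succ (n : Nat) (h : 0 < n) :
    popc n = popc (n / 2) + ((n % 2 : Nat) : Int) := by
  unfold popc
  rw [toBinChars_natCast, toBinChars_natCast, Nat.toDigits_eq_if (by omega : 1 < 2)]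
  rcases Nat.lt_or_ge n 2 with h2 | h2
  · interval_cases n
    decide
  · rw [if_neg (by omega)]
    have hd : (n % 2).digitChar = if n % 2 = 1 then '1' else '0' := by
      have := Nat.mod_lt n (show 0 < 2 by omega)
      interval_cases h : n % 2 <;> simp [Nat.digitChar]
    rw [List.count_append, hd]
    split_ifs with hp <;> simp <;> omega

-- A's step is B's dict update at the same key
lemma stepA_eq_modify (d : PySem.Dict Int (List Int)) (i : Int) :
    countLightStepA d i
      = d.modify ((PySem.Int.toBinChars i).count '1' : Nat) [] (fun l => l ++ [i]) := by
  unfold countLightStepA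
  cases h : d.get? ((PySem.Int.toBinChars i).count '1' : Nat) <;>
    simp [PySem.Dict.modify, PySem.Dict.getD, h]

-- one B step, starting from pc = [popc 0, …, popc (n-1)]
lemma stepB_eq (d : PySem.Dict Int (List Int)) (n : Nat) :
    countLightStepB (d, (List.range n).map popc) (n : Int)
      = (d.modify (popc n) [] (fun l => l ++ [(n : Int)]), (List.range (n + 1)).map popc) := by
  have hshift : (n : Int) >>> (1 : Nat) = ((n / 2 : Nat) : Int) := by
    simp [Int.shiftRight_eq_div_pow]
  have hnew : (if (n : Int) ≠ 0 then
      PySem.List.pyGetD ((List.range n).map popc) ((n : Int) >>> (1 : Nat)) 0 + PySem.Int.band (n : Int) 1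
      else 0) = popc n := by
    rcases Nat.eq_zero_or_pos n with rfl | hn
    · simp [popc_zero]
    · rw [if_pos (by exact_mod_cast hn.ne'), hshift, PySem.List.pyGetD_natCast,
          PySem.List.getD_map_range popc n (n / 2) 0 (by omega),
          PySem.Int.band_one]
      have hm : PySem.Int.mod (n : Int) 2 = ((n % 2 : Nat) : Int) := by
        exact_mod_cast PySem.Int.mod_natCast n 2
      rw [hm, ← popc_succ n hn]
  have hpc : (List.range n).map popc ++ [popc n] = (List.range (n + 1)).map popc := by
    simp [List.range_succ]
  simp only [countLightStepB]
  rw [hnew, hpc, PySem.List.pyGetD_natCast,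
      PySem.List.getD_map_range popc (n + 1) n 0 (by omega)]

-- loop invariant: B's fold carries A's dict together with pc = [popc 0, …, popc (n-1)]
lemma fold_eq (n : Nat) :
    (PySem.List.pyRange 0 (n : Int) 1).foldl countLightStepB (PySem.Dict.empty, [])
      = ((PySem.List.pyRange 0 (n : Int) 1).foldl countLightStepA PySem.Dict.empty,
         (List.range n).map popc) := by
  induction n with
  | zero => simp
  | succ n ih =>
    have hsplit : PySem.List.pyRange 0 ((n : Int) + 1) 1
        = PySem.List.pyRange 0 (n : Int) 1 ++ [(n : Int)] :=
      PySem.List.pyRange_one_succ_right (by positivity)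
    have hcast : ((n + 1 : Nat) : Int) = (n : Int) + 1 := by push_cast; ring
    rw [hcast, hsplit, List.foldl_append, List.foldl_append, ih,
        List.foldl_cons, List.foldl_nil, List.foldl_cons, List.foldl_nil,
        stepB_eq, stepA_eq_modify]
    rfl

lemma ports_agree (max_range : Int) : count_light max_range = count_light_alt max_range := by
  unfold count_light count_light_alt
  by_cases h : max_range ≤ 0
  · rw [show PySem.List.pyRange 0 max_range 1 = [] from
      PySem.List.pyRange_one_eq_nil (by omega)]
    rfl
  · have hmr : max_range = (max_range.toNat : Int) := by omega
    rw [hmr, fold_eq]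

-- ===== VERDICT (by name: the statement is the Claim_ definition above) =====
theorem count_light_spec : Claim_equal_count_light := by
  intro max_range _
  unfold Spec_count_light
  exact ports_agree max_range
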